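-- pv_equiv track=rewrite | github.com/Neymar022/bililive-go | contrib/subtitle-worker/segmenter.py | _dedupe_pass
-- ===== SOURCE A (Python) =====
-- def _dedupe_pass(text: str) -> str:
--     output: list[str] = []
--     index = 0
--     text_len = len(text)
--
--     while index < text_len:
--         collapsed = False
--         max_unit_len = min(4, (text_len - index) // 2)
--         for unit_len in range(max_unit_len, 1, -1):
--             unit = text[index : index + unit_len]
--             repeat_end = index + unit_len
--             repeat_count = 1
--             while text.startswith(unit, repeat_end):
--                 repeat_count += 1
--                 repeat_end += unit_len
--             if repeat_count > 1:
--                 output.append(unit)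
--                 index = repeat_end
--                 collapsed = True
--                 break
--         if not collapsed:
--             output.append(text[index])
--             index += 1
--
--     return "".join(output)
-- ===== SOURCE B (Python) =====
-- import re
--
-- _REPEAT_RE = re.compile(r'(?s)(.{2,4})\1+')
--
--
-- def _dedupe_pass(text: str) -> str:
--     # One regex substitution: the greedy group tries unit lengths 4,3,2 at each
--     # position, \1+ greedily eats all whole consecutive copies, and re.sub
--     # resumes after each collapsed run.
--     return _REPEAT_RE.sub(r'\1', text)
-- ===== Notes on version B (the rewrite author's own statement) =====
-- stated objective: faster
-- what changed: A's hand-written index scan (descending unit-length loop with an inner repeat-counting while) is replaced by a single DOTALL regex substitution whose greedy 2-4 char capture group and greedy backreference-plus reproduce exactly the same collapse, run by the C regex engine.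
import Mathlib
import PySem

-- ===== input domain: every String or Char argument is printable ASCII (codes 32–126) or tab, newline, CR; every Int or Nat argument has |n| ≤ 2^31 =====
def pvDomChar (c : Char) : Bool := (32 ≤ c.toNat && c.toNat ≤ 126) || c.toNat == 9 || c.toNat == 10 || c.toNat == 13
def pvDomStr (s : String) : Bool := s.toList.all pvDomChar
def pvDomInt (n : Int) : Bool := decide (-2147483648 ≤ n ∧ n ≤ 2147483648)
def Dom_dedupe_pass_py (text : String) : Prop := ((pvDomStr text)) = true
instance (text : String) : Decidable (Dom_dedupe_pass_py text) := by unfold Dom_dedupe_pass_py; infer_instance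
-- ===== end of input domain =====

-- B replaces A's hand-written index scan by one regex substitution
-- re.sub(r'(?s)(.{2,4})\1+', r'\1', text) (measurably faster by constant factor in Python;
-- here its matcher is ported by hand, step for step).

-- ===== PORT A =====
-- All Python ints here (index, text_len, unit_len, repeat_end, repeat_count) are nonnegative,
-- so Nat is exact, and (text_len - index) // 2 on nonnegatives is Nat division.
-- text.startswith(unit, pos) with 0 ≤ pos is exactly PySem.Chars.startswith (text.drop pos) unit.
-- The two while loops carry a fuel argument (text_len, always sufficient — each step advances
-- the index by at least 1) purely for totality; branches are otherwise A's, in A's order.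

-- inner 'while text.startswith(unit, repeat_end)': returns (repeat_count, repeat_end)
def aInner (text unit : List Char) (repeatEnd repeatCount fuel : Nat) : Nat × Nat :=
  match fuel with
  | 0 => (repeatCount, repeatEnd)
  | fuel + 1 =>
    if PySem.Chars.startswith (text.drop repeatEnd) unit then
      aInner text unit (repeatEnd + unit.length) (repeatCount + 1) fuel
    else (repeatCount, repeatEnd)

-- range(max_unit_len, 1, -1) = [max_unit_len, …, 2]
def aRange (maxUnitLen : Nat) : List Nat := (List.range' 2 (maxUnitLen - 1)).reverse

-- the 'for unit_len in range(…)' with its break: some (unit, new index) if collapsed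
def aFor (text : List Char) (index : Nat) : List Nat → Option (List Char × Nat)
  | [] => none
  | unitLen :: rest =>
    let unit := PySem.List.slice text (some (index : Int)) (some ((index : Int) + (unitLen : Int)))
    let r := aInner text unit (index + unitLen) 1 text.length
    if r.1 > 1 then some (unit, r.2) else aFor text index rest

-- the outer 'while index < text_len' accumulating output
def aLoop (text : List Char) (index : Nat) (output : List (List Char)) (fuel : Nat) :
    List (List Char) :=
  match fuel with
  | 0 => output
  | fuel + 1 =>
    if index < text.length then
      match aFor text index (aRange (min 4 ((text.length - index) / 2))) with
      | some (unit, repeatEnd) => aLoop text repeatEnd (output ++ [unit]) fuel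
      | none =>
        -- text[index]: index < text_len here, so the default is never used (exact)
        aLoop text (index + 1) (output ++ [[PySem.List.pyGetD text (index : Int) 'a']]) fuel
    else output

def dedupe_pass_py (text : String) : String :=
  String.ofList (PySem.Chars.join [] (aLoop text.toList 0 [] text.toList.length))

-- ===== PORT B =====
-- Source B is one call re.sub(r'(?s)(.{2,4})\1+', r'\1', text); no Lean regex library exists, so the
-- matcher for this fixed pattern is ported by hand, exactly: bStrip is the greedy '\1+' (strip all
-- leading copies of the captured unit; the 'u ≠ []' conjunct is a totality guard only, u always has
-- 2–4 chars), bTry tries the greedy group '(.{2,4})' at lengths 4, 3, 2 — with (?s), '.{L}' matches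
-- iff L chars are available, i.e. (s.take L).length = L — followed by at least one copy, and bSub
-- is re.sub's left-to-right scan: replace a match with its group and resume after it, else copy one
-- char and advance.
def bStrip (u s : List Char) : List Char :=
  if h : u ≠ [] ∧ PySem.Chars.startswith s u then bStrip u (s.drop u.length) else s
termination_by s.length
decreasing_by
  have hp := (PySem.Chars.startswith_iff s u).1 h.2
  have := hp.length_le
  have := List.length_pos_iff.mpr h.1
  simp only [List.length_drop]
  omega

def bTryLens (lens : List Nat) (s : List Char) : Option (List Char × List Char) :=
  match lens with
  | [] => none
  | L :: rest =>
    let u := s.take L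
    if u.length = L ∧ PySem.Chars.startswith (s.drop L) u then
      some (u, bStrip u (s.drop L))
    else bTryLens rest s

def bTry (s : List Char) : Option (List Char × List Char) := bTryLens [4, 3, 2] s

-- needed by bSub's termination (cited in decreasing_by)
theorem bStrip_length_le (u : List Char) : ∀ (n : Nat) (s : List Char), s.length ≤ n →
    (bStrip u s).length ≤ s.length := by
  intro n
  induction n with
  | zero =>
    intro s hs
    rw [bStrip]
    split
    · rename_i h
      have := List.IsPrefix.length_le ((PySem.Chars.startswith_iff s u).1 h.2)
      have := List.length_pos_iff.mpr h.1
      omega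
    · exact le_refl _
  | succ n ih =>
    intro s hs
    rw [bStrip]
    split
    · rename_i h
      have hp := List.IsPrefix.length_le ((PySem.Chars.startswith_iff s u).1 h.2)
      have hu := List.length_pos_iff.mpr h.1
      have := ih (s.drop u.length) (by simp; omega)
      simp only [List.length_drop] at this
      omega
    · exact le_refl _

theorem bTry_some_length_lt {s : List Char} {u rest : List Char}
    (h : bTry s = some (u, rest)) : rest.length < s.length := by
  have hgen : ∀ lens : List Nat, (∀ L ∈ lens, 2 ≤ L) →
      bTryLens lens s = some (u, rest) → rest.length < s.length := by
    intro lens hall h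
    induction lens with
    | nil => simp [bTryLens] at h
    | cons L tl ih =>
      rw [bTryLens] at h
      split at h
      · rename_i hc
        obtain ⟨hlen, _⟩ := hc
        have h2 : 2 ≤ L := hall L (by simp)
        have hLle : L ≤ s.length := by
          have : (s.take L).length = min L s.length := List.length_take
          omega
        obtain ⟨rfl, rfl⟩ : u = s.take L ∧ rest = bStrip (s.take L) (s.drop L) := by
          simpa using h.symm
        have := bStrip_length_le (s.take L) (s.drop L).length (s.drop L) (le_refl _)
        simp only [List.length_drop] at this
        omega
      · exact ih (fun L hL => hall L (by simp [hL])) h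
  exact hgen [4, 3, 2] (by decide) h

def bSub (s : List Char) : List Char :=
  match hm : bTry s with
  | some (u, rest) => u ++ bSub rest
  | none =>
    match s with
    | [] => []
    | c :: t => c :: bSub t
termination_by s.length
decreasing_by
  · exact bTry_some_length_lt hm
  · simp

def dedupe_pass_py_alt (text : String) : String := String.ofList (bSub text.toList)

-- ===== PRECONDITION & SPEC =====
def Spec_dedupe_pass_py (text : String) (out : String) : Prop := out = dedupe_pass_py_alt text
instance (text : String) (out : String) : Decidable (Spec_dedupe_pass_py text out) := by unfold Spec_dedupe_pass_py; infer_instance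

-- ===== CLAIM (what is proved, stated in full; the proofs are below) =====
def Claim_equal_dedupe_pass_py : Prop := ∀ (text : String), Dom_dedupe_pass_py text → Spec_dedupe_pass_py text (dedupe_pass_py text)

-- ===== LEMMAS AND PROOFS =====

theorem join_nil_eq_flatten : ∀ xs : List (List Char), PySem.Chars.join [] xs = xs.flatten
  | [] => PySem.Chars.join_nil []
  | [p] => by simp [PySem.Chars.join_singleton]
  | p :: q :: r => by
    rw [PySem.Chars.join_cons_cons]
    simp [join_nil_eq_flatten (q :: r)]

theorem aInner_snd_ge (text unit : List Char) :
    ∀ (fuel p c : Nat), p ≤ (aInner text unit p c fuel).2 := by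
  intro fuel
  induction fuel with
  | zero => intro p c; simp [aInner]
  | succ f ih =>
    intro p c
    rw [aInner]
    split
    · exact le_trans (by omega) (ih (p + unit.length) (c + 1))
    · simp

theorem aInner_fst_ge (text unit : List Char) :
    ∀ (fuel p c : Nat), c ≤ (aInner text unit p c fuel).1 := by
  intro fuel
  induction fuel with
  | zero => intro p c; simp [aInner]
  | succ f ih =>
    intro p c
    rw [aInner]
    split
    · exact le_trans (by omega) (ih (p + unit.length) (c + 1))
    · simp

theorem aInner_fst_gt_iff (text unit : List Char) (p c fuel : Nat) (hf : 1 ≤ fuel) :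
    c < (aInner text unit p c fuel).1 ↔ PySem.Chars.startswith (text.drop p) unit := by
  obtain ⟨f, rfl⟩ : ∃ f, fuel = f + 1 := ⟨fuel - 1, by omega⟩
  rw [aInner]
  split
  · rename_i hs
    simp only [hs, iff_true]
    exact lt_of_lt_of_le (by omega) (aInner_fst_ge text unit f (p + unit.length) (c + 1))
  · rename_i hs
    simp [hs]

theorem aInner_drop (text unit : List Char) (hu : unit ≠ []) :
    ∀ (fuel p c : Nat), text.length - p ≤ fuel →
      text.drop (aInner text unit p c fuel).2 = bStrip unit (text.drop p) := by
  intro fuel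
  induction fuel with
  | zero =>
    intro p c hf
    have hnil : text.drop p = [] := List.drop_eq_nil_of_le (by omega)
    rw [aInner, bStrip, hnil]
    have : ¬ PySem.Chars.startswith ([] : List Char) unit := by
      simp [PySem.Chars.startswith_iff, List.prefix_nil, hu]
    simp [this]
  | succ f ih =>
    intro p c hf
    rw [aInner]
    split
    · rename_i hs
      rw [bStrip, dif_pos ⟨hu, hs⟩, List.drop_drop]
      have hlen := List.IsPrefix.length_le ((PySem.Chars.startswith_iff _ _).1 hs)
      simp only [List.length_drop] at hlen
      have hpos := List.length_pos_iff.mpr hu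
      exact ih (p + unit.length) (c + 1) (by omega)
    · rename_i hs
      rw [bStrip]
      simp [hs]

theorem bcond_false (s : List Char) (L : Nat) (hL : 1 ≤ L) (h : s.length < 2 * L) :
    ¬ ((s.take L).length = L ∧ PySem.Chars.startswith (s.drop L) (s.take L)) := by
  rintro ⟨h1, h2⟩
  have := List.IsPrefix.length_le ((PySem.Chars.startswith_iff _ _).1 h2)
  simp only [List.length_take, List.length_drop] at *
  omega

theorem bTryLens_skip (s : List Char) (L : Nat) (rest : List Nat) (hL : 1 ≤ L)
    (h : s.length < 2 * L) : bTryLens (L :: rest) s = bTryLens rest s := by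
  rw [bTryLens, if_neg (bcond_false s L hL h)]

-- the inner for-loop of A and the group attempts of B agree, list of unit lengths by unit lengths
theorem chain (text : List Char) (index : Nat) (hidx : index < text.length) :
    ∀ Ls : List Nat, (∀ L ∈ Ls, 2 ≤ L ∧ index + 2 * L ≤ text.length) →
      (aFor text index Ls = none ∧ bTryLens Ls (text.drop index) = none) ∨
      (∃ u rend, aFor text index Ls = some (u, rend) ∧
        bTryLens Ls (text.drop index) = some (u, text.drop rend) ∧ index + 2 ≤ rend) := by
  intro Ls hall
  induction Ls with
  | nil => left; exact ⟨rfl, rfl⟩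
  | cons L rest ih =>
    obtain ⟨h2, hle⟩ := hall L (by simp)
    have hrest := ih (fun L hL => hall L (by simp [hL]))
    have hunit : PySem.List.slice text (some (index : Int))
        (some ((index : Int) + (L : Int))) = (text.drop index).take L :=
      PySem.List.slice_natCast_add text index L
    have hdd : (text.drop index).drop L = text.drop (index + L) := by
      rw [List.drop_drop, Nat.add_comm]
    have hulen : ((text.drop index).take L).length = L := by
      simp only [List.length_take, List.length_drop]; omega
    have hune : (text.drop index).take L ≠ [] := by
      intro hc
      have := congrArg List.length hc
      simp [hulen] at this
      omega
    have hfuel : 1 ≤ text.length := by omega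
    have hiff : (aInner text ((text.drop index).take L) (index + L) 1 text.length).1 > 1 ↔
        PySem.Chars.startswith ((text.drop index).drop L) ((text.drop index).take L) := by
      rw [gt_iff_lt, aInner_fst_gt_iff text ((text.drop index).take L) (index + L) 1
        text.length hfuel, hdd]
    by_cases hC : PySem.Chars.startswith ((text.drop index).drop L) ((text.drop index).take L)
    · right
      refine ⟨(text.drop index).take L,
        (aInner text ((text.drop index).take L) (index + L) 1 text.length).2, ?_, ?_, ?_⟩
      · simp only [aFor, hunit]
        rw [if_pos (hiff.mpr hC)]
      · rw [bTryLens, if_pos ⟨hulen, hC⟩]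
        rw [aInner_drop text ((text.drop index).take L) hune text.length (index + L) 1 (by omega),
          hdd]
      · exact le_trans (by omega) (aInner_snd_ge text _ text.length (index + L) 1)
    · have hngt : ¬ ((aInner text ((text.drop index).take L) (index + L) 1 text.length).1 > 1) :=
        fun h => hC (hiff.mp h)
      simp only [aFor, hunit]
      rw [if_neg hngt, bTryLens, if_neg (by rintro ⟨-, h⟩; exact hC h)]
      exact hrest

theorem bSub_nil : bSub [] = [] := by
  rw [bSub.eq_def]
  rfl

theorem bSub_some {s u rest : List Char} (h : bTry s = some (u, rest)) :
    bSub s = u ++ bSub rest := by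
  rw [bSub.eq_def]
  split
  · rename_i u' rest' heq
    rw [h] at heq
    obtain ⟨rfl, rfl⟩ : u = u' ∧ rest = rest' := by simpa using heq
    rfl
  · rename_i heq
    rw [h] at heq
    cases heq

theorem bSub_cons_of_none {c : Char} {t : List Char} (h : bTry (c :: t) = none) :
    bSub (c :: t) = c :: bSub t := by
  rw [bSub.eq_def]
  split
  · rename_i u' rest' heq
    rw [h] at heq
    cases heq
  · rfl

theorem main_loop (text : List Char) :
    ∀ (fuel index : Nat) (output : List (List Char)), text.length - index ≤ fuel →
      (aLoop text index output fuel).flatten = output.flatten ++ bSub (text.drop index) := by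
  intro fuel
  induction fuel with
  | zero =>
    intro index output hf
    have : text.drop index = [] := List.drop_eq_nil_of_le (by omega)
    rw [aLoop, this, bSub_nil, List.append_nil]
  | succ f ih =>
    intro index output hf
    rw [aLoop]
    by_cases hidx : index < text.length
    · rw [if_pos hidx]
      -- relate B's length list [4,3,2] to A's range(maxUnitLen, 1, -1)
      set n := text.length - index with hn
      have hbTry : bTry (text.drop index) =
          bTryLens (aRange (min 4 (n / 2))) (text.drop index) := by
        have hsl : (text.drop index).length = n := by simp [List.length_drop, hn]
        rw [bTry]
        have hcase : n ≤ 3 ∨ (4 ≤ n ∧ n ≤ 5) ∨ (6 ≤ n ∧ n ≤ 7) ∨ 8 ≤ n := by omega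
        rcases hcase with h | ⟨h, h'⟩ | ⟨h, h'⟩ | h
        · rw [bTryLens_skip _ 4 _ (by omega) (by rw [hsl]; omega),
            bTryLens_skip _ 3 _ (by omega) (by rw [hsl]; omega),
            bTryLens_skip _ 2 _ (by omega) (by rw [hsl]; omega)]
          have hr : aRange (min 4 (n / 2)) = [] := by
            have : min 4 (n / 2) - 1 = 0 := by omega
            simp [aRange, this]
          rw [hr, bTryLens]
        · rw [bTryLens_skip _ 4 _ (by omega) (by rw [hsl]; omega),
            bTryLens_skip _ 3 _ (by omega) (by rw [hsl]; omega)]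
          have hm : min 4 (n / 2) = 2 := by omega
          rw [hm]
          rfl
        · rw [bTryLens_skip _ 4 _ (by omega) (by rw [hsl]; omega)]
          have hm : min 4 (n / 2) = 3 := by omega
          rw [hm]
          rfl
        · have hm : min 4 (n / 2) = 4 := by omega
          rw [hm]
          rfl
      have hall : ∀ L ∈ aRange (min 4 (n / 2)), 2 ≤ L ∧ index + 2 * L ≤ text.length := by
        intro L hL
        have hmem : L ∈ List.range' 2 (min 4 (n / 2) - 1) := by
          simpa [aRange] using hL
        have := List.mem_range'_1.1 hmem
        constructor
        · omega
        · have hL4 : L ≤ min 4 (n / 2) := by omega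
          have : L ≤ n / 2 := le_trans hL4 (by omega)
          omega
      rcases chain text index hidx (aRange (min 4 (n / 2))) hall with
        ⟨hA, hB⟩ | ⟨u, rend, hA, hB, hrend⟩
      · rw [hA]
        have hBnone : bTry (text.drop index) = none := by rw [hbTry]; exact hB
        have hdrop : text.drop index = text[index] :: text.drop (index + 1) :=
          List.drop_eq_getElem_cons hidx
        have hbsub : bSub (text.drop index) = text[index] :: bSub (text.drop (index + 1)) := by
          rw [hdrop]
          exact bSub_cons_of_none (hdrop ▸ hBnone)
        have hget : PySem.List.pyGetD text (index : Int) 'a' = text[index] := by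
          rw [PySem.List.pyGetD_natCast]
          exact List.getD_eq_getElem text 'a' hidx
        rw [ih (index + 1) (output ++ [[PySem.List.pyGetD text (index : Int) 'a']]) (by omega),
          hbsub, hget]
        simp
      · rw [hA]
        have hBsome : bTry (text.drop index) = some (u, text.drop rend) := by
          rw [hbTry]; exact hB
        have hbsub : bSub (text.drop index) = u ++ bSub (text.drop rend) :=
          bSub_some hBsome
        rw [ih rend (output ++ [u]) (by omega), hbsub]
        simp
    · rw [if_neg hidx]
      have : text.drop index = [] := List.drop_eq_nil_of_le (by omega)
      rw [this, bSub_nil, List.append_nil]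

-- ===== VERDICT (by name: the statement is the Claim_ definition above) =====
theorem dedupe_pass_py_spec : Claim_equal_dedupe_pass_py := by
  intro text _
  unfold Spec_dedupe_pass_py dedupe_pass_py dedupe_pass_py_alt
  rw [join_nil_eq_flatten, main_loop text.toList text.toList.length 0 [] (by omega)]
  simp
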